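-- pv_equiv track=rewrite | github.com/nevertheless0404/Study_slowly | 2022.08.14/하샤드 수.py | solution
-- ===== SOURCE A (Python) =====
-- def solution(x):
--     sum = 0
--     for i in range(x):
--         sum += int(i)
--     if x % sum == 0:
--         return True
--     else:
--         return False
-- ===== SOURCE B (Python) =====
-- def solution(x):
--     return x % (x * (x - 1) // 2) == 0
-- ===== Notes on version B (the rewrite author's own statement) =====
-- stated objective: faster
-- what changed: Replaced the O(x) summation loop over range(x) with the closed-form Gauss sum x*(x-1)//2, making the divisibility test O(1).
import Mathlib
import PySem

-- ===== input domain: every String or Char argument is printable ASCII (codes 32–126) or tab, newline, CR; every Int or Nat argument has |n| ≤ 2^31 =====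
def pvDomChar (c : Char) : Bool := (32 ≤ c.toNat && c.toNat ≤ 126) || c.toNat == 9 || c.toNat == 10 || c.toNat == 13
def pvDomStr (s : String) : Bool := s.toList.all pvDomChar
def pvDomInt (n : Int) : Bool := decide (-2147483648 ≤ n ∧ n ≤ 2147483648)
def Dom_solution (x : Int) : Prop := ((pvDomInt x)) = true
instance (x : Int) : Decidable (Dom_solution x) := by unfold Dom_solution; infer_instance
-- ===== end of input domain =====

-- B replaces A's O(x) summation loop with the closed-form Gauss sum x*(x-1)//2 (O(1)).
-- ===== PORT A =====
def solution (x : Int) : Bool :=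
  let s := (PySem.List.pyRange 0 x 1).foldl (fun acc i => acc + i) 0
  if PySem.Int.mod x s = 0 then true else false

-- ===== PORT B =====
def solution_alt (x : Int) : Bool :=
  PySem.Int.mod x (PySem.Int.floordiv (x * (x - 1)) 2) = 0

-- ===== PRECONDITION & SPEC =====
-- Pre_ excludes x ≤ 1, where the loop sum is 0 and Python A raises ZeroDivisionError on x % 0.
def Pre_solution (x : Int) : Prop := 2 ≤ x
instance (x : Int) : Decidable (Pre_solution x) := by unfold Pre_solution; infer_instance
def pvWitness_solution : Int := (6)
def Spec_solution (x : Int) (out : Bool) : Prop := out = solution_alt x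
instance (x : Int) (out : Bool) : Decidable (Spec_solution x out) := by unfold Spec_solution; infer_instance

-- ===== CLAIM (what is proved, stated in full; the proofs are below) =====
def Claim_equal_solution : Prop := ∀ (x : Int), Dom_solution x → Pre_solution x → Spec_solution x (solution x)

-- ===== LEMMAS AND PROOFS =====
theorem sum_range_nat (n : Nat) : (List.range n).sum = n * (n - 1) / 2 := by
  have h := Finset.sum_range_id_mul_two n
  have hb : (∑ i ∈ Finset.range n, i) = (List.range n).sum := by
    simp [Finset.range, Multiset.range, List.sum_eq_foldr]
  omega

theorem gauss_sum (x : Int) (hx : 2 ≤ x) :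
    (PySem.List.pyRange 0 x 1).foldl (fun acc i => acc + i) 0
      = PySem.Int.floordiv (x * (x - 1)) 2 := by
  obtain ⟨n, rfl⟩ : ∃ n : Nat, x = (n : Int) := ⟨x.toNat, by omega⟩
  have hn : 1 ≤ n := by exact_mod_cast (by omega : (1:Int) ≤ n)
  have h1 : (n : Int) * ((n : Int) - 1) = ((n * (n - 1) : Nat) : Int) := by
    push_cast [Nat.cast_sub hn]; ring
  rw [h1, show (2:Int) = ((2:Nat):Int) from rfl, PySem.Int.floordiv_natCast]
  rw [PySem.List.foldl_add, PySem.List.pyRange_one]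
  simp only [Int.sub_zero, Int.toNat_natCast, zero_add, List.map_map]
  rw [show ((fun i : Int => i) ∘ (Nat.cast : Nat → Int)) = (Nat.cast : Nat → Int) from rfl,
    ← Nat.cast_list_sum, sum_range_nat]

-- ===== VERDICT (by name: the statement is the Claim_ definition above) =====
theorem solution_spec : Claim_equal_solution := by
  intro x _ hx
  unfold Spec_solution solution solution_alt
  rw [gauss_sum x hx]
  by_cases h : PySem.Int.mod x (PySem.Int.floordiv (x * (x - 1)) 2) = 0 <;> simp
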